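-- pv_equiv track=rewrite | github.com/Thaising-Taing/YOLOv2Tiny-Simulation | src/Pre_Processing_Scratch/New/Pre_Processing.py | Flip_Data
-- ===== SOURCE A (Python) =====
-- def Flip_Data(Data_List):
--     Flip_Data_List = []
--     for i in range(0, len(Data_List), 8):
--         segment = Data_List[i:i + 8]
--         if len(segment) == 8:
--             reversed_segment = list(reversed(segment))
--             Flip_Data_List.extend(reversed_segment)
--     return Flip_Data_List
-- ===== SOURCE B (Python) =====
-- def Flip_Data(Data_List):
--     total = len(Data_List) // 8 * 8
--     return [Data_List[(i // 8) * 8 + 7 - (i % 8)] for i in range(total)]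
-- ===== Notes on version B (the rewrite author's own statement) =====
-- stated objective: alternative
-- what changed: Replaces the slice-per-chunk loop (segment = xs[i:i+8]; extend(reversed(segment))) with a single flat comprehension over the output indices using the closed-form permutation xs[(i//8)*8 + 7 - i%8], computing the complete-chunk count len//8*8 up front instead of testing each segment's length.
import Mathlib
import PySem

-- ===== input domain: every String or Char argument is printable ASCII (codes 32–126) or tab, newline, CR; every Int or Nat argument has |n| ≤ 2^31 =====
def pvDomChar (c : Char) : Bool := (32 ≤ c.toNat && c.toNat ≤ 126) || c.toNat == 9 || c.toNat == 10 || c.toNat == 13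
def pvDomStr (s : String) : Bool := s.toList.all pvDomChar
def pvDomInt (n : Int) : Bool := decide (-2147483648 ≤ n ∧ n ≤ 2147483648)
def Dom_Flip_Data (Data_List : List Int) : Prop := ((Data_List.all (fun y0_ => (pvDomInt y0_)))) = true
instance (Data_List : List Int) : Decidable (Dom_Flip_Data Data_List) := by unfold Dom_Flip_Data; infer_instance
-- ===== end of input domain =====

-- B replaces A's slice-per-chunk loop by one flat map over the output indices with a
-- closed-form source-index permutation (alternative decomposition, same asymptotic cost).

-- ===== PORT A =====
-- for i in range(0, len(Data_List), 8): segment = Data_List[i:i+8]; if len == 8: extend(reversed(segment))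
def Flip_Data (Data_List : List Int) : List Int :=
  (PySem.List.pyRange 0 (Data_List.length : Int) 8).foldl
    (fun acc i =>
      let segment := PySem.List.slice Data_List (some i) (some (i + 8))
      if segment.length = 8 then acc ++ segment.reverse else acc) []

-- ===== PORT B =====
-- total = len(Data_List) // 8 * 8; [Data_List[(i//8)*8 + 7 - (i%8)] for i in range(total)]
-- (the computed index is always in range, so pyGetD with default 0 is exact here)
def Flip_Data_alt (Data_List : List Int) : List Int :=
  let total : Int := PySem.Int.floordiv (Data_List.length : Int) 8 * 8
  (PySem.List.pyRange 0 total 1).map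
    (fun i => PySem.List.pyGetD Data_List
      (PySem.Int.floordiv i 8 * 8 + 7 - PySem.Int.mod i 8) 0)

-- ===== PRECONDITION & SPEC =====
def Spec_Flip_Data (Data_List : List Int) (out : List Int) : Prop := out = Flip_Data_alt Data_List
instance (Data_List : List Int) (out : List Int) : Decidable (Spec_Flip_Data Data_List out) := by unfold Spec_Flip_Data; infer_instance

-- ===== CLAIM (what is proved, stated in full; the proofs are below) =====
def Claim_equal_Flip_Data : Prop := ∀ (Data_List : List Int), Dom_Flip_Data Data_List → Spec_Flip_Data Data_List (Flip_Data Data_List)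

-- ===== LEMMAS AND PROOFS =====

/-- Reference function: reverse each complete 8-chunk, drop the remainder. -/
def chunkRev : List Int → List Int
  | a :: b :: c :: d :: e :: f :: g :: h :: t =>
      [h, g, f, e, d, c, b, a] ++ chunkRev t
  | _ => []

lemma chunkRev_short (t : List Int) (h : t.length < 8) : chunkRev t = [] := by
  match t with
  | [] => rfl
  | [_] => rfl
  | [_, _] => rfl
  | [_, _, _] => rfl
  | [_, _, _, _] => rfl
  | [_, _, _, _, _] => rfl
  | [_, _, _, _, _, _] => rfl
  | [_, _, _, _, _, _, _] => rfl
  | _ :: _ :: _ :: _ :: _ :: _ :: _ :: _ :: _ => simp at h; omega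

lemma chunkRev_take_drop (t : List Int) (h : 8 ≤ t.length) :
    chunkRev t = (t.take 8).reverse ++ chunkRev (t.drop 8) := by
  match t with
  | a :: b :: c :: d :: e :: f :: g :: h8 :: rest => simp [chunkRev]
  | [] => simp at h
  | [_] => simp at h
  | [_, _] => simp at h
  | [_, _, _] => simp at h
  | [_, _, _, _] => simp at h
  | [_, _, _, _, _] => simp at h
  | [_, _, _, _, _, _] => simp at h
  | [_, _, _, _, _, _, _] => simp at h

lemma pyRange8_nil (a b : Int) (h : b ≤ a) : PySem.List.pyRange a b 8 = [] := by
  rw [PySem.List.pyRange_of_pos a b (by norm_num)]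
  simp [if_neg (not_lt.mpr h)]

lemma pyRange8_cons (a b : Int) (h : a < b) :
    PySem.List.pyRange a b 8 = a :: PySem.List.pyRange (a + 8) b 8 := by
  rw [PySem.List.pyRange_of_pos a b (by norm_num),
      PySem.List.pyRange_of_pos (a + 8) b (by norm_num)]
  by_cases h2 : a + 8 < b
  · rw [if_pos h, if_pos h2]
    have hm : ((b - a + 8 - 1) / 8).toNat = ((b - (a + 8) + 8 - 1) / 8).toNat + 1 := by omega
    rw [hm, List.range_succ_eq_map, List.map_cons, List.map_map]
    congr 1
    · push_cast; ring
    · refine List.map_congr_left fun k _ => ?_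
      simp only [Function.comp_apply]
      push_cast; ring
  · rw [if_pos h, if_neg h2]
    have hm : ((b - a + 8 - 1) / 8).toNat = 1 := by omega
    rw [hm]
    simp

lemma foldA (L : List Int) : ∀ (i : Nat) (acc : List Int),
    (PySem.List.pyRange (i : Int) (L.length : Int) 8).foldl
      (fun acc j =>
        let segment := PySem.List.slice L (some j) (some (j + 8))
        if segment.length = 8 then acc ++ segment.reverse else acc) acc
      = acc ++ chunkRev (L.drop i) := by
  intro i acc
  induction hfuel : L.length - i using Nat.strong_induction_on generalizing i acc with
  | _ n ih =>
  have hd : (L.drop i).length = L.length - i := by simp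
  by_cases hi : i < L.length
  · rw [pyRange8_cons _ _ (by exact_mod_cast hi)]
    simp only [List.foldl_cons]
    have hseg : PySem.List.slice L (some (i : Int)) (some ((i : Int) + 8)) =
        (L.drop i).take 8 := by
      have := PySem.List.slice_natCast_add L i 8
      simpa using this
    simp only [hseg]
    have hstep : ((i : Int) + 8) = ((i + 8 : Nat) : Int) := by push_cast; ring
    rw [hstep]
    have hdd : (L.drop i).drop 8 = L.drop (i + 8) := by
      rw [List.drop_drop]
    by_cases h8 : 8 ≤ (L.drop i).length
    · have hlen : ((L.drop i).take 8).length = 8 := by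
        rw [List.length_take]; omega
      rw [if_pos hlen, ih (L.length - (i + 8)) (by omega) (i + 8) _ rfl]
      rw [chunkRev_take_drop _ h8, List.append_assoc, hdd]
    · have hlen : ((L.drop i).take 8).length ≠ 8 := by
        rw [List.length_take]; omega
      rw [if_neg hlen, ih (L.length - (i + 8)) (by omega) (i + 8) _ rfl]
      have hnil : L.drop (i + 8) = [] := List.drop_eq_nil_of_le (by omega)
      rw [hnil, chunkRev_short [] (by simp), chunkRev_short (L.drop i) (by omega)]
  · rw [pyRange8_nil _ _ (by exact_mod_cast Nat.le_of_not_lt hi)]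
    rw [List.drop_eq_nil_of_le (by omega), chunkRev_short _ (by simp)]
    simp

lemma flipA_eq (L : List Int) : Flip_Data L = chunkRev L := by
  have := foldA L 0 []
  simpa [Flip_Data] using this

lemma alt_eq (L : List Int) :
    Flip_Data_alt L =
      (List.range (L.length / 8 * 8)).map
        (fun j => L.getD (j / 8 * 8 + (7 - j % 8)) 0) := by
  have h1 : PySem.Int.floordiv (L.length : Int) 8 * 8 = ((L.length / 8 * 8 : Nat) : Int) := by
    rw [show (8 : Int) = ((8 : Nat) : Int) from rfl, PySem.Int.floordiv_natCast]
    push_cast; ring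
  simp only [Flip_Data_alt]
  rw [h1, PySem.List.pyRange_zero_natCast, List.map_map]
  refine List.map_congr_left fun j hj => ?_
  have hidx : PySem.Int.floordiv (j : Int) 8 * 8 + 7 - PySem.Int.mod (j : Int) 8 =
      ((j / 8 * 8 + (7 - j % 8) : Nat) : Int) := by
    rw [show (8 : Int) = ((8 : Nat) : Int) from rfl, PySem.Int.floordiv_natCast,
        PySem.Int.mod_natCast]
    have : j % 8 ≤ 7 := by omega
    push_cast; omega
  simp only [Function.comp_apply, hidx, PySem.List.pyGetD_natCast]

lemma altNat_eq (L : List Int) :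
    (List.range (L.length / 8 * 8)).map
        (fun j => L.getD (j / 8 * 8 + (7 - j % 8)) 0) = chunkRev L := by
  induction hn : L.length using Nat.strong_induction_on generalizing L with
  | _ n ih =>
  subst hn
  by_cases h8 : 8 ≤ L.length
  · match L, h8 with
    | a :: b :: c :: d :: e :: f :: g :: h :: rest, _ =>
      have hlen : (a :: b :: c :: d :: e :: f :: g :: h :: rest).length = 8 + rest.length := by
        simp; omega
      have hdiv : (a :: b :: c :: d :: e :: f :: g :: h :: rest).length / 8 * 8 =
          8 + rest.length / 8 * 8 := by rw [hlen]; omega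
      rw [hdiv, List.range_add, List.map_append, List.map_map]
      have hfst : (List.range 8).map
          (fun j => (a :: b :: c :: d :: e :: f :: g :: h :: rest).getD
            (j / 8 * 8 + (7 - j % 8)) 0) = [h, g, f, e, d, c, b, a] := by
        simp [List.range_succ, List.getD]
      have hsnd : ∀ j : Nat,
          (a :: b :: c :: d :: e :: f :: g :: h :: rest).getD
            ((8 + j) / 8 * 8 + (7 - (8 + j) % 8)) 0 =
          rest.getD (j / 8 * 8 + (7 - j % 8)) 0 := by
        intro j
        have hq : (8 + j) / 8 * 8 + (7 - (8 + j) % 8) =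
            (j / 8 * 8 + (7 - j % 8)) + 8 := by omega
        rw [hq]
        rfl
      have hrec : (List.range (rest.length / 8 * 8)).map
          (fun j => rest.getD (j / 8 * 8 + (7 - j % 8)) 0) = chunkRev rest := by
        exact ih rest.length (by rw [hlen]; omega) rest rfl
      calc (List.range 8).map _ ++ (List.range (rest.length / 8 * 8)).map _
          = [h, g, f, e, d, c, b, a] ++
            (List.range (rest.length / 8 * 8)).map
              (fun j => rest.getD (j / 8 * 8 + (7 - j % 8)) 0) := by
            rw [hfst]
            exact congrArg _ (List.map_congr_left fun j _ => hsnd j)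
        _ = chunkRev (a :: b :: c :: d :: e :: f :: g :: h :: rest) := by
            rw [hrec]; rfl
  · have hz : L.length / 8 * 8 = 0 := by omega
    rw [hz, chunkRev_short _ (by omega)]
    rfl

-- ===== VERDICT (by name: the statement is the Claim_ definition above) =====
theorem Flip_Data_spec : Claim_equal_Flip_Data := by
  intro L _
  unfold Spec_Flip_Data
  rw [flipA_eq, alt_eq, altNat_eq]
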